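-- pv_equiv track=rewrite | github.com/danagle/everybody-codes-challenges | 2024-kingdom-of-algorithmia/quest18.py | shortest_path_to_all_palms
-- ===== SOURCE A (Python) =====
-- from collections import deque
--
-- def count_palms(grid: list[str]) -> int:
--     """
--     Count the total number of palm cells ('P') in the grid.
--     """
--     return sum(row.count('P') for row in grid)
--
-- def find_edge_starts(grid: list[str]) -> list[tuple[int, int]]:
--     """
--     Find all starting positions — cells marked '.' on the leftmost and rightmost edges.
--     """
--     R, C = len(grid), len(grid[0])
--     starts = []
--     for r in range(R):
--         for c in [0, C - 1]:  # Only check left and right edges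
--             if grid[r][c] == '.':
--                 starts.append((r, c))
--     return starts
--
-- def shortest_path_to_all_palms(grid: list[str]) -> int:
--     """
--     Perform a multi-source BFS starting from all '.' cells on the left/right edges,
--     and return the minimum number of steps needed to reach all palms ('P').
--
--     Returns:
--         The number of steps required to reach all palms.
--     """
--     R, C = len(grid), len(grid[0])
--     palms_remaining = count_palms(grid)
--
--     # Initialize BFS queue with all edge start positions
--     queue = deque([(0, r, c) for (r, c) in find_edge_starts(grid)])
--     visited = set()
--
--     # Directions for 4-way movement
--     directions = [(-1, 0), (1, 0), (0, -1), (0, 1)]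
--
--     while queue:
--         dist, r, c = queue.popleft()
--         if (r, c) in visited:
--             continue
--         visited.add((r, c))
--
--         # Found a palm — mark it as collected
--         if grid[r][c] == 'P':
--             palms_remaining -= 1
--             if palms_remaining == 0:
--                 return dist
--
--         # Explore neighboring cells
--         for dr, dc in directions:
--             rr, cc = r + dr, c + dc
--             if (
--                 0 <= rr < R
--                 and 0 <= cc < C
--                 and grid[rr][cc] != '#'
--             ):
--                 queue.append((dist + 1, rr, cc))
--
--     raise RuntimeError("Unable to reach all palms.")
-- ===== SOURCE B (Python) =====
-- def shortest_path_to_all_palms(grid: list[str]) -> int: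
--     """Level-synchronous multi-source BFS filling a distance map, then a
--     separate pass over the grid's palm cells taking the max distance."""
--     R, C = len(grid), len(grid[0])
--     dist = {}
--     frontier = [(r, c) for r in range(R) for c in (0, C - 1) if grid[r][c] == '.']
--     d = 0
--     while frontier:
--         nxt = []
--         for rc in frontier:
--             if rc not in dist:
--                 dist[rc] = d
--                 r, c = rc
--                 for rr, cc in ((r - 1, c), (r + 1, c), (r, c - 1), (r, c + 1)):
--                     if 0 <= rr < R and 0 <= cc < C and grid[rr][cc] != '#':
--                         nxt.append((rr, cc))
--         frontier = nxt
--         d += 1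
--     best = None
--     for r in range(R):
--         row = grid[r]
--         for c in range(len(row)):
--             if row[c] == 'P':
--                 pd = dist.get((r, c))
--                 if pd is None:
--                     raise RuntimeError("Unable to reach all palms.")
--                 if best is None or pd > best:
--                     best = pd
--     if best is None:
--         raise RuntimeError("Unable to reach all palms.")
--     return best
-- ===== Notes on version B (the rewrite author's own statement) =====
-- stated objective: alternative
-- what changed: A runs a dist-tagged FIFO deque BFS that counts palms down and early-returns on the last palm; B runs a level-synchronous frontier BFS filling a distance dict to completion and then a separate pass over the grid's palm cells returning the maximum recorded distance (raising the same RuntimeError when a palm is missing or no palm exists).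
import Mathlib
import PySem

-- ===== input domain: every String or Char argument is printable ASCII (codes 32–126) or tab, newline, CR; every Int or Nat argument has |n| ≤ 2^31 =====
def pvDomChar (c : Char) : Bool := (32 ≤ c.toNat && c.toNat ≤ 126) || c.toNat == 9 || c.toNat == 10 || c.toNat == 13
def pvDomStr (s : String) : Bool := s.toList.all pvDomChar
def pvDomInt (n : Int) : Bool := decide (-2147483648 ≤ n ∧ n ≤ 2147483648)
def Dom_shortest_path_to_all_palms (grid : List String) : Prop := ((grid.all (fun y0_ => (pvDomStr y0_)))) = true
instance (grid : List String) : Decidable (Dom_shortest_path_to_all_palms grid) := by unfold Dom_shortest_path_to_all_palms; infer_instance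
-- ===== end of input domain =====

-- B replaces A's early-exit dist-tagged deque BFS (counting palms down inside the loop) by a
-- level-synchronous BFS that fills a distance dict to completion, followed by a separate pass
-- over the grid's palm cells taking the maximum recorded distance (objective: alternative).

-- ===== shared low-level helpers (both Pythons read grid[r][c] the same way) =====

-- grid[r][c]; out-of-range reads default to '#' (Python raises there; such inputs are outside Pre_).
def pvCAt (grid : List String) (r c : Int) : Char :=
  match PySem.List.pyGet? grid r with
  | none => '#'
  | some row => (PySem.Str.pyGet? row c).getD '#'

-- len(grid[0]); pvC [] = 0 (Python raises on [], outside Pre_)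
def pvC (grid : List String) : Int :=
  match grid with
  | [] => 0
  | row :: _ => PySem.Str.len row

def pvInCells (R C : Int) (p : Int × Int) : Bool :=
  decide (0 ≤ p.1) && decide (p.1 < R) && decide (0 ≤ p.2) && decide (p.2 < C)

-- the shared bounds-and-wall check `0 <= rr < R and 0 <= cc < C and grid[rr][cc] != '#'`
def pvOpen (grid : List String) (R C : Int) (p : Int × Int) : Bool :=
  pvInCells R C p && decide (pvCAt grid p.1 p.2 ≠ '#')

def pvCells (R C : Int) : List (Int × Int) :=
  (PySem.List.pyRange 0 R 1).flatMap (fun r => (PySem.List.pyRange 0 C 1).map (fun c => (r, c)))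

-- number of grid cells not yet visited/keyed: the termination measure of both BFS loops
def pvUnvis (R C : Int) (v : List (Int × Int)) : Nat :=
  (pvCells R C).countP (fun x => !v.contains x)

lemma pv_countP_lt_of_mem {α : Type} [DecidableEq α] (l : List α) (p q : α → Bool)
    (h : ∀ a, p a = true → q a = true) (x : α) (hx : x ∈ l)
    (hq : q x = true) (hp : p x = false) : l.countP p < l.countP q := by
  induction l with
  | nil => cases hx
  | cons a l ih =>
    rcases List.mem_cons.mp hx with rfl | hx'
    · have hle : l.countP p ≤ l.countP q := List.countP_mono_left (fun a _ => h a)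
      simp [hp, hq]; omega
    · have := ih hx'
      by_cases hpa : p a = true
      · simp [hpa, h a hpa]; omega
      · simp only [List.countP_cons]
        rw [Bool.not_eq_true] at hpa
        simp [hpa]; omega

lemma pv_mem_pvCells {R C : Int} {x : Int × Int} :
    x ∈ pvCells R C ↔ pvInCells R C x = true := by
  obtain ⟨r, c⟩ := x
  simp only [pvCells, List.mem_flatMap, List.mem_map, PySem.List.mem_pyRange_one, pvInCells,
    Bool.and_eq_true, decide_eq_true_eq]
  constructor
  · rintro ⟨a, ha, b, hb, heq⟩
    cases heq
    exact ⟨⟨⟨ha.1, ha.2⟩, hb.1⟩, hb.2⟩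
  · rintro ⟨⟨⟨h1, h2⟩, h3⟩, h4⟩
    exact ⟨r, ⟨h1, h2⟩, c, ⟨h3, h4⟩, rfl⟩

lemma pvUnvis_append_le (R C : Int) (v : List (Int × Int)) (x : Int × Int) :
    pvUnvis R C (v ++ [x]) ≤ pvUnvis R C v := by
  apply List.countP_mono_left
  intro a _ ha
  simp only [List.contains_append, Bool.not_eq_true', Bool.or_eq_false_iff] at ha
  simpa using ha.1

lemma pvUnvis_append_lt (R C : Int) (v : List (Int × Int)) (x : Int × Int)
    (hx : pvInCells R C x = true) (hnx : x ∉ v) :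
    pvUnvis R C (v ++ [x]) < pvUnvis R C v := by
  refine pv_countP_lt_of_mem _ _ _ ?_ x (pv_mem_pvCells.mpr hx) ?_ ?_
  · intro a ha
    simp only [List.contains_append, Bool.not_eq_true', Bool.or_eq_false_iff] at ha
    simpa using ha.1
  · simpa using hnx
  · simp

-- ===== PORT A =====

def count_palms (grid : List String) : Int :=
  List.foldl (fun acc row => acc + (PySem.Str.count row "P" : Int)) 0 grid

def find_edge_starts (grid : List String) : List (Int × Int) :=
  let C := pvC grid
  List.foldl (fun starts r =>
    List.foldl (fun starts c =>
      if pvCAt grid r c == '.' then starts ++ [(r, c)] else starts) starts [0, C - 1])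
    [] (PySem.List.pyRange 0 (grid.length : Int) 1)

def pvDirections : List (Int × Int) := [(-1, 0), (1, 0), (0, -1), (0, 1)]

-- the BFS pop loop of A (deque of (dist, r, c)); `none` = the final `raise RuntimeError`.
-- The dite guard only makes the recursion total (it holds throughout every run started on Pre_).
def aBFS (grid : List String) (R C : Int) (q : List (Int × Int × Int))
    (v : PySem.Set (Int × Int)) (palms : Int) : Option Int :=
  if hq : ∀ x ∈ q, pvInCells R C x.2 = true then
    match q with
    | [] => none
    | (dist, r, c) :: rest =>
      if hv : PySem.Set.contains v (r, c) then
        aBFS grid R C rest v palms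
      else
        let v' := PySem.Set.add v (r, c)
        let pushes := List.foldl (fun acc dd =>
          if pvOpen grid R C (r + dd.1, c + dd.2) then acc ++ [(dist + 1, r + dd.1, c + dd.2)]
          else acc) [] pvDirections
        if pvCAt grid r c == 'P' then
          if palms - 1 = 0 then some dist
          else aBFS grid R C (rest ++ pushes) v' (palms - 1)
        else aBFS grid R C (rest ++ pushes) v' palms
  else none
termination_by (pvUnvis R C v, q.length)
decreasing_by
  · apply Prod.Lex.right; simp
  · apply Prod.Lex.left
    have hx : pvInCells R C (r, c) = true := hq (dist, r, c) (List.mem_cons_self)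
    have hnx : (r, c) ∉ v := fun hmem => hv ((PySem.Set.contains_iff v (r, c)).mpr hmem)
    rw [PySem.Set.add_of_not_mem hnx]
    exact pvUnvis_append_lt R C v (r, c) hx hnx
  · apply Prod.Lex.left
    have hx : pvInCells R C (r, c) = true := hq (dist, r, c) (List.mem_cons_self)
    have hnx : (r, c) ∉ v := fun hmem => hv ((PySem.Set.contains_iff v (r, c)).mpr hmem)
    rw [PySem.Set.add_of_not_mem hnx]
    exact pvUnvis_append_lt R C v (r, c) hx hnx

def shortest_path_to_all_palms (grid : List String) : Int :=
  (aBFS grid (grid.length : Int) (pvC grid)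
      ((find_edge_starts grid).map (fun rc => ((0 : Int), rc.1, rc.2)))
      PySem.Set.empty (count_palms grid)).getD 0

-- ===== PORT B =====

-- the `[(r, c) for r in range(R) for c in (0, C - 1) if grid[r][c] == '.']` comprehension
def pvStarts (grid : List String) (C : Int) : List (Int × Int) :=
  (PySem.List.pyRange 0 (grid.length : Int) 1).flatMap (fun r =>
    (([0, C - 1] : List Int).filter (fun c => pvCAt grid r c == '.')).map (fun c => (r, c)))

-- one frontier cell of B's level loop: record its distance if new, push its open neighbours
def bStep (grid : List String) (R C d : Int)
    (st : PySem.Dict (Int × Int) Int × List (Int × Int)) (rc : Int × Int) :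
    PySem.Dict (Int × Int) Int × List (Int × Int) :=
  if st.1.contains rc then st
  else (st.1.insert rc d,
        st.2 ++ ([(rc.1 - 1, rc.2), (rc.1 + 1, rc.2), (rc.1, rc.2 - 1), (rc.1, rc.2 + 1)].filter
          (pvOpen grid R C)))

lemma bStep_cases (grid : List String) (R C d : Int) (st) (rc : Int × Int) :
    bStep grid R C d st rc = st ∨
      ((bStep grid R C d st rc).1.keys = st.1.keys ++ [rc] ∧ rc ∉ st.1.keys) := by
  by_cases h : st.1.contains rc = true
  · left; simp [bStep, h]
  · right
    constructor
    · simp only [bStep, h, Bool.false_eq_true, if_neg, not_false_iff]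
      exact PySem.Dict.keys_insert_of_not_contains st.1 d (by simp_all)
    · intro hmem
      exact h ((PySem.Dict.contains_iff_mem_keys st.1 rc).mpr hmem)

lemma bfold_unvis_le (grid : List String) (R C d : Int) :
    ∀ (l : List (Int × Int)) (st : PySem.Dict (Int × Int) Int × List (Int × Int)),
      pvUnvis R C (List.foldl (bStep grid R C d) st l).1.keys ≤ pvUnvis R C st.1.keys := by
  intro l
  induction l with
  | nil => intro st; simp
  | cons x l ih =>
    intro st
    simp only [List.foldl_cons]
    refine le_trans (ih _) ?_
    rcases bStep_cases grid R C d st x with h | ⟨h, _⟩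
    · rw [h]
    · rw [h]; exact pvUnvis_append_le R C st.1.keys x

lemma bfold_dec_or_eq (grid : List String) (R C d : Int) :
    ∀ (l : List (Int × Int)) (st : PySem.Dict (Int × Int) Int × List (Int × Int)),
      (∀ x ∈ l, pvInCells R C x = true) →
      (List.foldl (bStep grid R C d) st l) = st ∨
        pvUnvis R C (List.foldl (bStep grid R C d) st l).1.keys < pvUnvis R C st.1.keys := by
  intro l
  induction l with
  | nil => intro st _; left; rfl
  | cons x l ih =>
    intro st hl
    simp only [List.foldl_cons]
    rcases bStep_cases grid R C d st x with h | ⟨h, hnx⟩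
    · rw [h]; exact ih st (fun y hy => hl y (List.mem_cons_of_mem _ hy))
    · right
      refine lt_of_le_of_lt (bfold_unvis_le grid R C d l _) ?_
      rw [h]
      exact pvUnvis_append_lt R C st.1.keys x (hl x List.mem_cons_self) hnx

-- B's `while frontier:` level loop.  The dite guard only makes the recursion total
-- (every frontier produced by the loop, and the initial one on Pre_, satisfies it).
def bLoop (grid : List String) (R C : Int) (frontier : List (Int × Int))
    (dist : PySem.Dict (Int × Int) Int) (d : Int) : PySem.Dict (Int × Int) Int :=
  if frontier.isEmpty then dist
  else if hf : ∀ x ∈ frontier, pvInCells R C x = true then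
    let res := List.foldl (bStep grid R C d) (dist, []) frontier
    bLoop grid R C res.2 res.1 (d + 1)
  else dist
termination_by (pvUnvis R C dist.keys, frontier.length)
decreasing_by
  simp only [List.foldl_attach]
  rcases bfold_dec_or_eq grid R C d frontier (dist, []) hf with h | h
  · rw [h]
    apply Prod.Lex.right
    cases frontier with
    | nil => simp_all
    | cons a l => simp
  · exact Prod.Lex.left _ _ h

-- best-so-far update for one palm cell; outer `none` = the `raise RuntimeError` for a missing palm
def pvPalmStep (dist : PySem.Dict (Int × Int) Int) (acc : Option (Option Int)) (x : Int × Int) :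
    Option (Option Int) :=
  match acc with
  | none => none
  | some best =>
    match dist.get? x with
    | none => none
    | some pd =>
      some (some (match best with
        | none => pd
        | some b => if b < pd then pd else b))

-- the final pass: for r, row; for c in range(len(row)): if row[c] == 'P': …
def bScan (grid : List String) (dist : PySem.Dict (Int × Int) Int) : Option (Option Int) :=
  List.foldl (fun acc p =>
    List.foldl (fun acc q =>
      if q.2 == 'P' then pvPalmStep dist acc (p.1, q.1) else acc) acc
      (PySem.List.enumerate p.2.toList 0))
    (some none) (PySem.List.enumerate grid 0)

def shortest_path_to_all_palms_alt (grid : List String) : Int :=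
  match bScan grid
      (bLoop grid (grid.length : Int) (pvC grid) (pvStarts grid (pvC grid))
        PySem.Dict.empty 0) with
  | some (some best) => best
  | _ => 0

-- ===== PRECONDITION & SPEC =====

-- all palm cells of the grid, in the scan order of B's final pass
def palmCells (grid : List String) : List (Int × Int) :=
  (PySem.List.enumerate grid 0).flatMap (fun p =>
    (PySem.List.enumerate p.2.toList 0).filterMap (fun q =>
      if q.2 == 'P' then some (p.1, q.1) else none))

-- one saturation step of reachability from the edge '.' cells (a spec-level least-fixpoint,
-- not either port's BFS loop)
def pvSatStep (grid : List String) (R C : Int) (S : List (Int × Int)) : List (Int × Int) :=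
  S ++ (pvCells R C).filter (fun x =>
    !S.contains x && pvOpen grid R C x &&
      S.any (fun y => (y.1 - x.1).natAbs + (y.2 - x.2).natAbs == 1))

def pvSat (grid : List String) (R C : Int) : Nat → List (Int × Int) → List (Int × Int)
  | 0, S => S
  | n + 1, S =>
    let S' := pvSatStep grid R C S
    if S'.length = S.length then S else pvSat grid R C n S'

def pvReach (grid : List String) : List (Int × Int) :=
  pvSat grid (grid.length : Int) (pvC grid) ((grid.length * (pvC grid).toNat)) (pvStarts grid (pvC grid))

-- Pre_ = exactly the inputs on which Python A returns (anything else raises IndexError or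
-- RuntimeError): nonempty rectangular-enough grid, at least one palm, every palm reachable
-- from an edge '.' cell.
def Pre_shortest_path_to_all_palms (grid : List String) : Prop :=
  grid ≠ [] ∧ 1 ≤ pvC grid ∧ (∀ row ∈ grid, pvC grid ≤ PySem.Str.len row) ∧
    palmCells grid ≠ [] ∧ (∀ x ∈ palmCells grid, x ∈ pvReach grid)
instance (grid : List String) : Decidable (Pre_shortest_path_to_all_palms grid) := by
  unfold Pre_shortest_path_to_all_palms; infer_instance

def pvWitness_shortest_path_to_all_palms : List String := ["P."]

def Spec_shortest_path_to_all_palms (grid : List String) (out : Int) : Prop :=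
  out = shortest_path_to_all_palms_alt grid
instance (grid : List String) (out : Int) : Decidable (Spec_shortest_path_to_all_palms grid out) := by
  unfold Spec_shortest_path_to_all_palms; infer_instance

-- ===== CLAIM (what is proved, stated in full; the proofs are below) =====
def Claim_equal_shortest_path_to_all_palms : Prop := ∀ (grid : List String), Dom_shortest_path_to_all_palms grid → Pre_shortest_path_to_all_palms grid → Spec_shortest_path_to_all_palms grid (shortest_path_to_all_palms grid)

-- ===== LEMMAS AND PROOFS =====

-- B's BFS continued from the middle of the level at depth d: l₁ still to process at depth d,
-- l₂ the next frontier collected so far (proof-only device for the simulation)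
def bContinue (grid : List String) (R C d : Int) (l₁ l₂ : List (Int × Int))
    (dist : PySem.Dict (Int × Int) Int) : PySem.Dict (Int × Int) Int :=
  let res := List.foldl (bStep grid R C d) (dist, l₂) l₁
  bLoop grid R C res.2 res.1 (d + 1)

def pvBOut (grid : List String) (dist : PySem.Dict (Int × Int) Int) : Option Int :=
  match bScan grid dist with
  | some (some b) => some b
  | _ => none


-- ---- generic list/fold helpers ----

lemma pv_foldl_if {α β γ : Type} (p : α → Bool) (f : α → β) (g : γ → β → γ) :
    ∀ (l : List α) (acc : γ),
      List.foldl (fun a x => if p x then g a (f x) else a) acc l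
        = List.foldl g acc (l.filterMap (fun x => if p x then some (f x) else none)) := by
  intro l
  induction l with
  | nil => intro acc; rfl
  | cons x l ih =>
    intro acc
    by_cases hx : p x = true
    · simp [hx, ih]
    · simp only [Bool.not_eq_true] at hx
      simp [hx, ih]

lemma pv_filterMap_if {α β : Type} (p : α → Bool) (f : α → β) (l : List α) :
    l.filterMap (fun x => if p x then some (f x) else none) = (l.filter p).map f := by
  induction l with
  | nil => rfl
  | cons x l ih =>
    by_cases hx : p x = true
    · simp [hx, ih]
    · simp only [Bool.not_eq_true] at hx
      simp [hx, ih]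

lemma pv_mem_enumerate {α : Type} :
    ∀ {l : List α} {s : Int} {q : Int × α},
      q ∈ PySem.List.enumerate l s ↔ ∃ k : Nat, ∃ hk : k < l.length, q = (s + k, l[k]) := by
  intro l
  induction l with
  | nil => intro s q; simp [PySem.List.enumerate]
  | cons x l ih =>
    intro s q
    rw [PySem.List.enumerate_cons]
    constructor
    · intro hq
      rcases List.mem_cons.mp hq with rfl | hq'
      · exact ⟨0, by simp, by simp⟩
      · rcases ih.mp hq' with ⟨k, hk, rfl⟩
        exact ⟨k + 1, by simpa using hk, by simp; omega⟩
    · rintro ⟨k, hk, rfl⟩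
      cases k with
      | zero => simp
      | succ k =>
        apply List.mem_cons_of_mem
        apply ih.mpr
        exact ⟨k, by simpa using hk, by simp; omega⟩

-- ---- grid access bridges ----

lemma pvCAt_nat (grid : List String) (k i : Nat) (hk : k < grid.length)
    (hi : i < grid[k].toList.length) :
    pvCAt grid (k : Int) (i : Int) = grid[k].toList[i] := by
  unfold pvCAt
  rw [PySem.List.pyGet?_natCast, List.getElem?_eq_getElem hk]
  simp only [PySem.Str.pyGet?_natCast]
  rw [List.getElem?_eq_getElem hi]
  rfl

-- ---- palm cells ----

lemma pv_palmRow_eq (dummyR : Int) (row : String) :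
    (PySem.List.enumerate row.toList 0).filterMap
        (fun q => if q.2 == 'P' then some (dummyR, q.1) else none)
      = ((PySem.List.enumerate row.toList 0).filter (fun q => q.2 == 'P')).map
          (fun q => (dummyR, q.1)) :=
  pv_filterMap_if _ _ _

lemma pv_palmRow_length (r : Int) (row : String) :
    ((PySem.List.enumerate row.toList 0).filterMap
        (fun q => if q.2 == 'P' then some (r, q.1) else none)).length
      = row.toList.count 'P' := by
  rw [pv_palmRow_eq, List.length_map, ← List.countP_eq_length_filter]
  have h1 : (fun q : Int × Char => q.2 == 'P') = ((fun ch => ch == 'P') ∘ Prod.snd) := rfl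
  rw [h1, ← List.countP_map, PySem.List.map_snd_enumerate]
  rfl

lemma pv_count_go : ∀ (fuel : Nat) (l : List Char) (acc : Nat), l.length ≤ fuel →
    PySem.Chars.count.go ['P'] fuel l acc = acc + l.count 'P' := by
  intro fuel
  induction fuel with
  | zero =>
    intro l acc h
    rw [PySem.Chars.count.go]
    cases l with
    | nil => simp
    | cons a l => simp at h
  | succ n ih =>
    intro l acc h
    cases l with
    | nil => rw [PySem.Chars.count.go] <;> simp
    | cons a l =>
      rw [PySem.Chars.count.go]
      by_cases ha : a = 'P'
      · subst ha
        simp only [List.isPrefixOf, List.count_cons]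
        simp [ih l (acc + 1) (by simpa using Nat.le_of_succ_le_succ h)]
        omega
      · simp only [List.isPrefixOf]
        have hb : ('P' == a) = false := by
          simp only [beq_eq_false_iff_ne]; exact fun h' => ha h'.symm
        simp [hb, ih l acc (by simpa using Nat.le_of_succ_le_succ h), ha]

lemma pv_chars_count (l : List Char) : PySem.Chars.count l ['P'] = l.count 'P' := by
  unfold PySem.Chars.count
  simpa using pv_count_go l.length l 0 le_rfl

lemma pv_palmCells_gen (grid : List String) : ∀ (s : Int),
    ((PySem.List.enumerate grid s).flatMap (fun p =>
      (PySem.List.enumerate p.2.toList 0).filterMap (fun q =>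
        if q.2 == 'P' then some (p.1, q.1) else none))).length
      = (grid.map (fun row => row.toList.count 'P')).sum := by
  induction grid with
  | nil => intro s; rfl
  | cons row rest ih =>
    intro s
    rw [PySem.List.enumerate_cons]
    simp only [List.flatMap_cons, List.length_append, List.map_cons, List.sum_cons]
    rw [pv_palmRow_length, ih]

lemma pv_CP (grid : List String) : count_palms grid = ((palmCells grid).length : Int) := by
  unfold count_palms palmCells
  rw [PySem.List.foldl_add, pv_palmCells_gen grid 0]
  simp only [zero_add]
  rw [Nat.cast_list_sum, List.map_map]
  congr 1
  apply List.map_congr_left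
  intro row _
  simp [pv_chars_count]

lemma pv_mem_palmCells {grid : List String} {x : Int × Int} :
    x ∈ palmCells grid ↔ ∃ k : Nat, ∃ hk : k < grid.length, ∃ i : Nat,
      ∃ hi : i < grid[k].toList.length, grid[k].toList[i] = 'P' ∧ x = ((k : Int), (i : Int)) := by
  unfold palmCells
  simp only [List.mem_flatMap, List.mem_filterMap]
  constructor
  · rintro ⟨p, hp, q, hq, hx⟩
    rcases pv_mem_enumerate.mp hp with ⟨k, hk, rfl⟩
    rcases pv_mem_enumerate.mp hq with ⟨i, hi, rfl⟩
    by_cases hP : (grid[k].toList[i] == 'P') = true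
    · rw [if_pos (by simpa using hP)] at hx
      injection hx with hx
      refine ⟨k, hk, i, hi, by simpa using hP, ?_⟩
      rw [← hx]
      simp
    · rw [if_neg (by simpa using hP)] at hx
      cases hx
  · rintro ⟨k, hk, i, hi, hP, rfl⟩
    refine ⟨((k : Int), grid[k]), pv_mem_enumerate.mpr ⟨k, hk, by simp⟩,
      ((i : Int), grid[k].toList[i]), pv_mem_enumerate.mpr ⟨i, hi, by simp⟩, ?_⟩
    simp [hP]

lemma pv_P2 {grid : List String} {x : Int × Int} (hx : x ∈ palmCells grid) :
    pvCAt grid x.1 x.2 = 'P' := by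
  rcases pv_mem_palmCells.mp hx with ⟨k, hk, i, hi, hP, rfl⟩
  simpa [pvCAt_nat grid k i hk hi] using hP

lemma pv_P1 {grid : List String} {C : Int} {x : Int × Int}
    (hrows : ∀ row ∈ grid, C ≤ PySem.Str.len row)
    (hcell : pvInCells (grid.length : Int) C x = true)
    (hP : pvCAt grid x.1 x.2 = 'P') : x ∈ palmCells grid := by
  obtain ⟨r, c⟩ := x
  simp only [pvInCells, Bool.and_eq_true, decide_eq_true_eq] at hcell
  obtain ⟨⟨⟨h1, h2⟩, h3⟩, h4⟩ := hcell
  have hk : r.toNat < grid.length := by omega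
  have hrow : C ≤ PySem.Str.len grid[r.toNat] := hrows _ (List.getElem_mem hk)
  have hlen : PySem.Str.len grid[r.toNat] = (grid[r.toNat].toList.length : Int) := by
    simp [PySem.Str.len_eq]
  have hi : c.toNat < grid[r.toNat].toList.length := by omega
  apply pv_mem_palmCells.mpr
  refine ⟨r.toNat, hk, c.toNat, hi, ?_, by simp; omega⟩
  rw [← pvCAt_nat grid r.toNat c.toNat hk hi]
  have hr' : ((r.toNat : Nat) : Int) = r := by omega
  have hc' : ((c.toNat : Nat) : Int) = c := by omega
  rw [hr', hc']
  exact hP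

lemma pv_nodup_palmCells (grid : List String) : (palmCells grid).Nodup := by
  unfold palmCells
  have hfst : (List.map (fun x => x.1) (PySem.List.enumerate grid 0)).Nodup := by
    rw [PySem.List.map_fst_enumerate]
    exact PySem.List.nodup_pyRange_one _ _
  rw [List.nodup_flatMap]
  constructor
  · intro p hp
    rw [pv_palmRow_eq]
    have hfst2 : (List.map (fun x => x.1) (PySem.List.enumerate p.2.toList 0)).Nodup := by
      rw [PySem.List.map_fst_enumerate]
      exact PySem.List.nodup_pyRange_one _ _
    have hinj := List.inj_on_of_nodup_map hfst2
    apply List.Nodup.map_on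
    · intro q hq q' hq' heq
      have h1 : q.1 = q'.1 := congrArg Prod.snd heq
      exact hinj (List.mem_of_mem_filter hq) (List.mem_of_mem_filter hq') h1
    · exact (hfst2.of_map _).filter _
  · have hpw : List.Pairwise (fun a b : Int × String => a.1 ≠ b.1) (PySem.List.enumerate grid 0) :=
      List.pairwise_map.mp hfst
    apply hpw.imp
    intro a b hab
    rw [Function.onFun, pv_palmRow_eq, pv_palmRow_eq]
    intro z hza hzb
    rcases List.mem_map.mp hza with ⟨q, _, rfl⟩
    rcases List.mem_map.mp hzb with ⟨q', _, hq'⟩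
    exact hab (by rw [← congrArg Prod.fst hq'])

-- ---- counting palms among keys ----

lemma pv_palmKeys_le {grid : List String} {C : Int} {keys : List (Int × Int)}
    (hnd : keys.Nodup) (hkc : ∀ x ∈ keys, pvInCells (grid.length : Int) C x = true)
    (hrows : ∀ row ∈ grid, C ≤ PySem.Str.len row) :
    keys.countP (fun x => pvCAt grid x.1 x.2 == 'P') ≤ (palmCells grid).length := by
  rw [List.countP_eq_length_filter]
  apply List.Subperm.length_le
  apply List.subperm_of_subset (hnd.filter _)
  intro x hx
  rcases List.mem_filter.mp hx with ⟨hxk, hxP⟩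
  exact pv_P1 hrows (hkc x hxk) (by simpa using hxP)

lemma pv_palmKeys_all {grid : List String} {C : Int} {keys : List (Int × Int)}
    (hnd : keys.Nodup) (hkc : ∀ x ∈ keys, pvInCells (grid.length : Int) C x = true)
    (hrows : ∀ row ∈ grid, C ≤ PySem.Str.len row)
    (heq : keys.countP (fun x => pvCAt grid x.1 x.2 == 'P') = (palmCells grid).length) :
    ∀ x ∈ palmCells grid, x ∈ keys := by
  classical
  set f := keys.filter (fun x => pvCAt grid x.1 x.2 == 'P') with hf
  have hfnd : f.Nodup := hnd.filter _
  have hsub : f ⊆ palmCells grid := by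
    intro x hx
    rcases List.mem_filter.mp hx with ⟨hxk, hxP⟩
    exact pv_P1 hrows (hkc x hxk) (by simpa using hxP)
  have hlen : f.length = (palmCells grid).length := by
    rw [hf, ← List.countP_eq_length_filter, heq]
  have hsubF : f.toFinset ⊆ (palmCells grid).toFinset := by
    intro x hx
    rw [List.mem_toFinset] at *
    exact hsub hx
  have hcard : (palmCells grid).toFinset.card ≤ f.toFinset.card := by
    rw [List.toFinset_card_of_nodup hfnd, List.toFinset_card_of_nodup (pv_nodup_palmCells grid),
      hlen]
  have hEq := Finset.eq_of_subset_of_card_le hsubF hcard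
  intro x hx
  have : x ∈ f.toFinset := by
    rw [hEq, List.mem_toFinset]
    exact hx
  rw [List.mem_toFinset] at this
  exact List.mem_of_mem_filter this

lemma pv_palmKeys_missing {grid : List String} {keys : List (Int × Int)}
    (hlt : keys.countP (fun x => pvCAt grid x.1 x.2 == 'P') < (palmCells grid).length) :
    ∃ x ∈ palmCells grid, x ∉ keys := by
  by_contra hcon
  push Not at hcon
  have hsub : palmCells grid ⊆ keys.filter (fun x => pvCAt grid x.1 x.2 == 'P') := by
    intro x hx
    exact List.mem_filter.mpr ⟨hcon x hx, by simpa using pv_P2 hx⟩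
  have := (List.subperm_of_subset (pv_nodup_palmCells grid) hsub).length_le
  rw [← List.countP_eq_length_filter] at this
  omega

-- ---- bScan as a fold over the palm cells ----

lemma pv_bScan_eq (grid : List String) (dist : PySem.Dict (Int × Int) Int) :
    bScan grid dist = List.foldl (pvPalmStep dist) (some none) (palmCells grid) := by
  unfold bScan palmCells
  rw [List.foldl_flatMap]
  congr 1
  funext acc p
  exact pv_foldl_if _ _ _ _ acc

lemma pv_scan_absorb (dist : PySem.Dict (Int × Int) Int) :
    ∀ l : List (Int × Int), List.foldl (pvPalmStep dist) none l = none := by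
  intro l
  induction l with
  | nil => rfl
  | cons y l ih => simpa [pvPalmStep] using ih

lemma pv_scan_raise (dist : PySem.Dict (Int × Int) Int) :
    ∀ (l : List (Int × Int)) (acc : Option (Option Int)),
      (∃ x ∈ l, dist.get? x = none) → List.foldl (pvPalmStep dist) acc l = none := by
  intro l
  induction l with
  | nil => rintro acc ⟨x, hx, -⟩; cases hx
  | cons y l ih =>
    rintro acc ⟨x, hx, hnone⟩
    rcases List.mem_cons.mp hx with rfl | hx'
    · rw [List.foldl_cons]
      cases acc with
      | none => exact pv_scan_absorb dist l
      | some b =>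
        have : pvPalmStep dist (some b) x = none := by simp [pvPalmStep, hnone]
        rw [this]
        exact pv_scan_absorb dist l
    · rw [List.foldl_cons]
      exact ih _ ⟨x, hx', hnone⟩

lemma pv_scan_max (dist : PySem.Dict (Int × Int) Int) (dm : Int) :
    ∀ (l : List (Int × Int)) (b0 : Option Int),
      (∀ x ∈ l, ∃ v, dist.get? x = some v ∧ v ≤ dm) →
      ((∃ x ∈ l, dist.get? x = some dm) ∨ b0 = some dm) →
      (∀ b, b0 = some b → b ≤ dm) →
      List.foldl (pvPalmStep dist) (some b0) l = some (some dm) := by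
  intro l
  induction l with
  | nil =>
    rintro b0 - hw hb
    rcases hw with ⟨x, hx, -⟩ | rfl
    · cases hx
    · rfl
  | cons y l ih =>
    rintro b0 hall hw hb
    obtain ⟨v, hv, hvle⟩ := hall y List.mem_cons_self
    rw [List.foldl_cons]
    cases b0 with
    | none =>
      have hstep : pvPalmStep dist (some none) y = some (some v) := by simp [pvPalmStep, hv]
      rw [hstep]
      apply ih (some v) (fun x hx => hall x (List.mem_cons_of_mem _ hx))
      · rcases hw with ⟨x, hx, hxd⟩ | h0
        · rcases List.mem_cons.mp hx with rfl | hx'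
          · right; rw [hv] at hxd; cases hxd; rfl
          · exact Or.inl ⟨x, hx', hxd⟩
        · cases h0
      · intro b hbb; cases hbb; exact hvle
    | some b =>
      have hble := hb b rfl
      have hstep : pvPalmStep dist (some (some b)) y
          = some (some (if b < v then v else b)) := by
        simp [pvPalmStep, hv]
      rw [hstep]
      apply ih (some (if b < v then v else b)) (fun x hx => hall x (List.mem_cons_of_mem _ hx))
      · rcases hw with ⟨x, hx, hxd⟩ | h0
        · rcases List.mem_cons.mp hx with rfl | hx'
          · right; rw [hv] at hxd
            injection hxd with hxd
            subst hxd
            congr 1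
            split_ifs <;> omega
          · exact Or.inl ⟨x, hx', hxd⟩
        · right
          injection h0 with h0
          subst h0
          congr 1
          split_ifs <;> omega
      · intro b' hbb
        injection hbb with hbb
        rw [← hbb]
        split_ifs <;> omega

-- ---- dict monotonicity through B's loop ----

lemma pv_bStep_mono (grid : List String) (R C d : Int) (st) (rc : Int × Int)
    (k : Int × Int) (v : Int) (h : st.1.get? k = some v) :
    (bStep grid R C d st rc).1.get? k = some v := by
  by_cases hc : st.1.contains rc = true
  · simp [bStep, hc, h]
  · have hne : k ≠ rc := by
      rintro rfl
      rw [PySem.Dict.contains_eq_isSome_get?, h] at hc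
      simp at hc
    simp only [bStep, hc, Bool.false_eq_true, if_false]
    rw [PySem.Dict.get?_insert_of_ne st.1 d hne]
    exact h

lemma pv_bfold_mono (grid : List String) (R C d : Int) :
    ∀ (l : List (Int × Int)) (st) (k : Int × Int) (v : Int), st.1.get? k = some v →
      (List.foldl (bStep grid R C d) st l).1.get? k = some v := by
  intro l
  induction l with
  | nil => intro st k v h; exact h
  | cons x l ih =>
    intro st k v h
    rw [List.foldl_cons]
    exact ih _ k v (pv_bStep_mono grid R C d st x k v h)

lemma pv_bLoop_mono (grid : List String) (R C : Int) :
    ∀ (n : Nat) (fr : List (Int × Int)) (dist : PySem.Dict (Int × Int) Int) (d : Int)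
      (k : Int × Int) (v : Int),
      pvUnvis R C dist.keys < n → dist.get? k = some v →
      (bLoop grid R C fr dist d).get? k = some v := by
  intro n
  induction n with
  | zero => intro fr dist d k v hn; omega
  | succ n ih =>
    intro fr dist d k v hn h
    rw [bLoop]
    by_cases he : fr.isEmpty = true
    · rw [if_pos he]; exact h
    · rw [if_neg he]
      by_cases hf : ∀ x ∈ fr, pvInCells R C x = true
      · rw [dif_pos hf]
        have hres := pv_bfold_mono grid R C d fr (dist, []) k v h
        rcases bfold_dec_or_eq grid R C d fr (dist, []) hf with hEq | hLt
        · rw [hEq]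
          rw [bLoop]
          simpa using h
        · refine ih _ _ _ k v ?_ hres
          have hLt' : pvUnvis R C (List.foldl (bStep grid R C d) (dist, []) fr).1.keys
              < pvUnvis R C dist.keys := hLt
          omega
      · rw [dif_neg hf]; exact h

lemma pv_bContinue_mono (grid : List String) (R C d : Int) (l₁ l₂ : List (Int × Int))
    (dist : PySem.Dict (Int × Int) Int) (k : Int × Int) (v : Int)
    (h : dist.get? k = some v) :
    (bContinue grid R C d l₁ l₂ dist).get? k = some v := by
  unfold bContinue
  have hres := pv_bfold_mono grid R C d l₁ (dist, l₂) k v h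
  exact pv_bLoop_mono grid R C _ _ _ _ k v (Nat.lt_succ_self _) hres

-- ---- A's pushes = B's neighbour filter ----

lemma pv_aPushes_eq (grid : List String) (R C dist r c : Int) :
    List.foldl (fun acc dd =>
        if pvOpen grid R C (r + dd.1, c + dd.2) then acc ++ [(dist + 1, r + dd.1, c + dd.2)]
        else acc) ([] : List (Int × Int × Int)) pvDirections
      = (([(r - 1, c), (r + 1, c), (r, c - 1), (r, c + 1)]).filter (pvOpen grid R C)).map
          (fun p => (dist + 1, p.1, p.2)) := by
  have e1 : r + (-1 : Int) = r - 1 := by ring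
  have e2 : c + (-1 : Int) = c - 1 := by ring
  have e3 : r + (1 : Int) = r + 1 := rfl
  have e4 : c + (0 : Int) = c := by ring
  have e5 : r + (0 : Int) = r := by ring
  have e6 : c + (1 : Int) = c + 1 := rfl
  simp only [pvDirections, List.foldl_cons, List.foldl_nil, List.filter_cons, List.filter_nil,
    e1, e2, e4, e5]
  split_ifs <;> simp

lemma pv_open_inCells {grid : List String} {R C : Int} {p : Int × Int}
    (h : pvOpen grid R C p = true) : pvInCells R C p = true := by
  simp only [pvOpen, Bool.and_eq_true] at h
  exact h.1

-- ---- A's edge starts = B's comprehension ----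

lemma pv_starts_eq (grid : List String) : find_edge_starts grid = pvStarts grid (pvC grid) := by
  unfold find_edge_starts pvStarts
  simp only [PySem.List.foldl_append_if, PySem.List.foldl_append_eq_flatMap, List.nil_append]

lemma pv_starts_cells {grid : List String} (hC : 1 ≤ pvC grid) :
    ∀ x ∈ pvStarts grid (pvC grid), pvInCells (grid.length : Int) (pvC grid) x = true := by
  intro x hx
  unfold pvStarts at hx
  simp only [List.mem_flatMap, List.mem_map, List.mem_filter, PySem.List.mem_pyRange_one] at hx
  obtain ⟨r, ⟨hr0, hrR⟩, c, ⟨hcmem, -⟩, rfl⟩ := hx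
  have hc : c = 0 ∨ c = pvC grid - 1 := by simpa using hcmem
  simp only [pvInCells, Bool.and_eq_true, decide_eq_true_eq]
  omega

-- ---- unfolding lemmas for A's loop ----

lemma pv_aBFS_nil (grid : List String) (R C : Int) (v : PySem.Set (Int × Int)) (palms : Int) :
    aBFS grid R C [] v palms = none := by
  rw [aBFS]
  split <;> rfl

lemma pv_aBFS_skip (grid : List String) (R C dist r c : Int) (rest : List (Int × Int × Int))
    (v : PySem.Set (Int × Int)) (palms : Int)
    (hq : ∀ x ∈ ((dist, r, c) :: rest), pvInCells R C x.2 = true)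
    (hv : PySem.Set.contains v (r, c) = true) :
    aBFS grid R C ((dist, r, c) :: rest) v palms = aBFS grid R C rest v palms := by
  rw [aBFS, dif_pos hq]
  exact dif_pos hv

lemma pv_aBFS_visit (grid : List String) (R C dist r c : Int) (rest : List (Int × Int × Int))
    (v : PySem.Set (Int × Int)) (palms : Int)
    (hq : ∀ x ∈ ((dist, r, c) :: rest), pvInCells R C x.2 = true)
    (hv : PySem.Set.contains v (r, c) = false) (hnv : (r, c) ∉ v) :
    aBFS grid R C ((dist, r, c) :: rest) v palms =
      if pvCAt grid r c == 'P' then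
        if palms - 1 = 0 then some dist
        else aBFS grid R C
          (rest ++ (([(r - 1, c), (r + 1, c), (r, c - 1), (r, c + 1)]).filter
              (pvOpen grid R C)).map (fun p => (dist + 1, p.1, p.2)))
          (v ++ [(r, c)]) (palms - 1)
      else aBFS grid R C
          (rest ++ (([(r - 1, c), (r + 1, c), (r, c - 1), (r, c + 1)]).filter
              (pvOpen grid R C)).map (fun p => (dist + 1, p.1, p.2)))
          (v ++ [(r, c)]) palms := by
  rw [aBFS, dif_pos hq]
  refine Eq.trans (dif_neg (by simpa using hnv)) ?_
  rw [pv_aPushes_eq, PySem.Set.add_of_not_mem hnv]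

-- ---- the simulation: A's pop loop against B's level loop, plus B's final scan ----

lemma pv_master (grid : List String) (C : Int)
    (hrows : ∀ row ∈ grid, C ≤ PySem.Str.len row) :
    ∀ (n m : Nat) (d : Int) (l₁ l₂ : List (Int × Int)) (dist : PySem.Dict (Int × Int) Int)
      (palms : Int),
      pvUnvis (grid.length : Int) C dist.keys < n →
      l₁.length + l₂.length < m →
      (∀ z ∈ l₁, pvInCells (grid.length : Int) C z = true) →
      (∀ z ∈ l₂, pvInCells (grid.length : Int) C z = true) →
      dist.keys.Nodup →
      (∀ z ∈ dist.keys, pvInCells (grid.length : Int) C z = true) →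
      palms = ((palmCells grid).length : Int)
        - (dist.keys.countP (fun z => pvCAt grid z.1 z.2 == 'P') : Int) →
      (0 < (palmCells grid).length → 0 < palms) →
      (∀ z v, dist.get? z = some v → v ≤ d) →
      aBFS grid (grid.length : Int) C
          (l₁.map (fun rc => (d, rc.1, rc.2)) ++ l₂.map (fun rc => (d + 1, rc.1, rc.2)))
          dist.keys palms
        = pvBOut grid (bContinue grid (grid.length : Int) C d l₁ l₂ dist) := by
  intro n
  induction n with
  | zero => intro m d l₁ l₂ dist palms hn; omega
  | succ n ihn =>
    intro m
    induction m with
    | zero => intro d l₁ l₂ dist palms hn hm; omega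
    | succ m ihm =>
      intro d l₁ l₂ dist palms hn hm h1 h2 hnd hkc hpal hpos hval
      have hpop : ∀ (d : Int) (xr xc : Int) (l₁ l₂ : List (Int × Int))
          (dist : PySem.Dict (Int × Int) Int) (palms : Int),
          l₁.length + l₂.length < m →
          pvUnvis (grid.length : Int) C dist.keys < n + 1 →
          (∀ z ∈ ((xr, xc) :: l₁), pvInCells (grid.length : Int) C z = true) →
          (∀ z ∈ l₂, pvInCells (grid.length : Int) C z = true) →
          dist.keys.Nodup →
          (∀ z ∈ dist.keys, pvInCells (grid.length : Int) C z = true) →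
          palms = ((palmCells grid).length : Int)
            - (dist.keys.countP (fun z => pvCAt grid z.1 z.2 == 'P') : Int) →
          (0 < (palmCells grid).length → 0 < palms) →
          (∀ z v, dist.get? z = some v → v ≤ d) →
          aBFS grid (grid.length : Int) C
              (((xr, xc) :: l₁).map (fun rc => (d, rc.1, rc.2))
                ++ l₂.map (fun rc => (d + 1, rc.1, rc.2)))
              dist.keys palms
            = pvBOut grid (bContinue grid (grid.length : Int) C d ((xr, xc) :: l₁) l₂ dist) := by
        clear hn hm h1 h2 hnd hkc hpal hpos hval d l₁ l₂ dist palms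
        intro d xr xc l₁ l₂ dist palms hlen hnU hx1 h2 hnd hkc hpal hpos hval
        have hx : pvInCells (grid.length : Int) C (xr, xc) = true := hx1 _ List.mem_cons_self
        have h1 : ∀ z ∈ l₁, pvInCells (grid.length : Int) C z = true :=
          fun z hz => hx1 z (List.mem_cons_of_mem _ hz)
        simp only [List.map_cons, List.cons_append]
        have hq : ∀ z ∈ ((d, xr, xc) :: (l₁.map (fun rc => (d, rc.1, rc.2))
            ++ l₂.map (fun rc => (d + 1, rc.1, rc.2)))), pvInCells (grid.length : Int) C z.2 = true := by
          intro z hz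
          rcases List.mem_cons.mp hz with rfl | hz'
          · exact hx
          · rcases List.mem_append.mp hz' with hz2 | hz2
            · rcases List.mem_map.mp hz2 with ⟨rc, hrc, rfl⟩
              exact h1 rc hrc
            · rcases List.mem_map.mp hz2 with ⟨rc, hrc, rfl⟩
              exact h2 rc hrc
        by_cases hv : PySem.Set.contains dist.keys (xr, xc) = true
        · -- already visited: both sides skip the cell
          rw [pv_aBFS_skip grid _ C d xr xc _ dist.keys palms hq hv]
          have hcd : dist.contains (xr, xc) = true := by
            rw [PySem.Dict.contains_iff_mem_keys]
            exact (PySem.Set.contains_iff _ _).mp hv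
          have hbc : bContinue grid (grid.length : Int) C d ((xr, xc) :: l₁) l₂ dist
              = bContinue grid (grid.length : Int) C d l₁ l₂ dist := by
            unfold bContinue
            rw [List.foldl_cons]
            simp [bStep, hcd]
          rw [hbc]
          exact ihm d l₁ l₂ dist palms hnU (by omega) h1 h2 hnd hkc hpal hpos hval
        · -- newly visited cell
          have hv' : PySem.Set.contains dist.keys (xr, xc) = false := by
            simpa using hv
          have hnmx : (xr, xc) ∉ dist.keys := fun hm' => hv ((PySem.Set.contains_iff _ _).mpr hm')
          have hdc : dist.contains (xr, xc) = false := by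
            cases hcc : dist.contains (xr, xc) with
            | false => rfl
            | true => exact absurd ((PySem.Dict.contains_iff_mem_keys _ _).mp hcc) hnmx
          rw [pv_aBFS_visit grid _ C d xr xc _ dist.keys palms hq hv' hnmx]
          have hbc : bContinue grid (grid.length : Int) C d ((xr, xc) :: l₁) l₂ dist
              = bContinue grid (grid.length : Int) C d l₁
                  (l₂ ++ ([(xr - 1, xc), (xr + 1, xc), (xr, xc - 1), (xr, xc + 1)]).filter
                    (pvOpen grid (grid.length : Int) C))
                  (dist.insert (xr, xc) d) := by
            unfold bContinue
            rw [List.foldl_cons]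
            simp [bStep, hdc]
          have hkeys : (dist.insert (xr, xc) d).keys = dist.keys ++ [(xr, xc)] :=
            PySem.Dict.keys_insert_of_not_contains dist d hdc
          have hnd' : (dist.insert (xr, xc) d).keys.Nodup := by
            rw [hkeys]
            refine List.Nodup.append hnd (List.nodup_singleton _) ?_
            simp only [List.disjoint_singleton]
            exact hnmx
          have hkc' : ∀ z ∈ (dist.insert (xr, xc) d).keys,
              pvInCells (grid.length : Int) C z = true := by
            rw [hkeys]
            intro z hz
            rcases List.mem_append.mp hz with hz' | hz'
            · exact hkc z hz'
            · rw [List.mem_singleton.mp hz']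
              exact hx
          have hval' : ∀ z v, (dist.insert (xr, xc) d).get? z = some v → v ≤ d := by
            intro z v hz
            by_cases hzx : z = (xr, xc)
            · subst hzx
              rw [PySem.Dict.get?_insert_self] at hz
              injection hz with hz
              omega
            · rw [PySem.Dict.get?_insert_of_ne dist d hzx] at hz
              exact hval z v hz
          have hUlt : pvUnvis (grid.length : Int) C (dist.insert (xr, xc) d).keys
              < pvUnvis (grid.length : Int) C dist.keys := by
            rw [hkeys]
            exact pvUnvis_append_lt _ C dist.keys (xr, xc) hx hnmx
          have hPuCells : ∀ z ∈ ([(xr - 1, xc), (xr + 1, xc), (xr, xc - 1), (xr, xc + 1)]).filter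
              (pvOpen grid (grid.length : Int) C), pvInCells (grid.length : Int) C z = true :=
            fun z hz => pv_open_inCells (List.mem_filter.mp hz).2
          have h2' : ∀ z ∈ l₂ ++ ([(xr - 1, xc), (xr + 1, xc), (xr, xc - 1), (xr, xc + 1)]).filter
              (pvOpen grid (grid.length : Int) C), pvInCells (grid.length : Int) C z = true := by
            intro z hz
            rcases List.mem_append.mp hz with hz' | hz'
            · exact h2 z hz'
            · exact hPuCells z hz'
          have hshape : (l₁.map (fun rc => (d, rc.1, rc.2))
                ++ l₂.map (fun rc => ((d : Int) + 1, rc.1, rc.2)))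
                ++ (([(xr - 1, xc), (xr + 1, xc), (xr, xc - 1), (xr, xc + 1)]).filter
                  (pvOpen grid (grid.length : Int) C)).map (fun p => (d + 1, p.1, p.2))
              = l₁.map (fun rc => (d, rc.1, rc.2))
                ++ (l₂ ++ ([(xr - 1, xc), (xr + 1, xc), (xr, xc - 1), (xr, xc + 1)]).filter
                  (pvOpen grid (grid.length : Int) C)).map (fun rc => (d + 1, rc.1, rc.2)) := by
            rw [List.map_append, List.append_assoc]
          by_cases hP : (pvCAt grid xr xc == 'P') = true
          · rw [if_pos hP]
            have hxPalm : (xr, xc) ∈ palmCells grid := pv_P1 hrows hx (by simpa using hP)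
            have hLpos : 0 < (palmCells grid).length := List.length_pos_of_mem hxPalm
            have hcount' : (dist.insert (xr, xc) d).keys.countP
                  (fun z => pvCAt grid z.1 z.2 == 'P')
                = dist.keys.countP (fun z => pvCAt grid z.1 z.2 == 'P') + 1 := by
              rw [hkeys, List.countP_append]
              simp [hP]
            have hcntle : (dist.insert (xr, xc) d).keys.countP
                  (fun z => pvCAt grid z.1 z.2 == 'P') ≤ (palmCells grid).length :=
              pv_palmKeys_le hnd' hkc' hrows
            by_cases hz : palms - 1 = 0
            · rw [if_pos hz]
              have hcnt_all : (dist.insert (xr, xc) d).keys.countP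
                  (fun z => pvCAt grid z.1 z.2 == 'P') = (palmCells grid).length := by
                omega
              have hall := pv_palmKeys_all hnd' hkc' hrows hcnt_all
              have hget : ∀ p ∈ palmCells grid, ∃ v,
                  (bContinue grid (grid.length : Int) C d l₁
                    (l₂ ++ ([(xr - 1, xc), (xr + 1, xc), (xr, xc - 1), (xr, xc + 1)]).filter
                      (pvOpen grid (grid.length : Int) C)) (dist.insert (xr, xc) d)).get? p
                    = some v ∧ v ≤ d := by
                intro p hp
                have hpk := hall p hp
                rcases ho : (dist.insert (xr, xc) d).get? p with _ | v
                · rw [PySem.Dict.get?_eq_none_iff_not_mem_keys] at ho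
                  exact absurd hpk ho
                · exact ⟨v, pv_bContinue_mono _ _ _ _ _ _ _ p v ho, hval' p v ho⟩
              have hwit : (bContinue grid (grid.length : Int) C d l₁
                    (l₂ ++ ([(xr - 1, xc), (xr + 1, xc), (xr, xc - 1), (xr, xc + 1)]).filter
                      (pvOpen grid (grid.length : Int) C)) (dist.insert (xr, xc) d)).get? (xr, xc)
                  = some d :=
                pv_bContinue_mono _ _ _ _ _ _ _ _ _ (PySem.Dict.get?_insert_self dist (xr, xc) d)
              rw [hbc]
              unfold pvBOut
              rw [pv_bScan_eq, pv_scan_max _ d _ none hget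
                (Or.inl ⟨(xr, xc), hxPalm, hwit⟩) (by rintro b ⟨⟩)]
            · rw [if_neg hz, hshape, ← hkeys, hbc]
              refine ihn (l₁.length + (l₂ ++ ([(xr - 1, xc), (xr + 1, xc), (xr, xc - 1),
                  (xr, xc + 1)]).filter (pvOpen grid (grid.length : Int) C)).length + 1)
                d l₁ _ (dist.insert (xr, xc) d) (palms - 1) (by omega) (by omega)
                h1 h2' hnd' hkc' ?_ ?_ hval'
              · rw [hcount']
                push_cast
                omega
              · intro _
                omega
          · rw [if_neg hP, hshape, ← hkeys, hbc]
            have hcount' : (dist.insert (xr, xc) d).keys.countP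
                  (fun z => pvCAt grid z.1 z.2 == 'P')
                = dist.keys.countP (fun z => pvCAt grid z.1 z.2 == 'P') := by
              rw [hkeys, List.countP_append]
              simp [hP]
            refine ihn (l₁.length + (l₂ ++ ([(xr - 1, xc), (xr + 1, xc), (xr, xc - 1),
                (xr, xc + 1)]).filter (pvOpen grid (grid.length : Int) C)).length + 1)
              d l₁ _ (dist.insert (xr, xc) d) palms (by omega) (by omega)
              h1 h2' hnd' hkc' (by rw [hcount']; exact hpal) hpos hval'
      cases l₁ with
      | cons x l₁' =>
        obtain ⟨xr, xc⟩ := x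
        refine hpop d xr xc l₁' l₂ dist palms ?_ hn h1 h2 hnd hkc hpal hpos hval
        simp only [List.length_cons] at hm
        omega
      | nil =>
        cases l₂ with
        | nil =>
          simp only [List.map_nil, List.nil_append]
          rw [pv_aBFS_nil]
          have hrhs : bContinue grid (grid.length : Int) C d [] [] dist = dist := by
            unfold bContinue
            rw [List.foldl_nil, bLoop]
            simp
          rw [hrhs]
          unfold pvBOut
          rcases Nat.eq_zero_or_pos (palmCells grid).length with hL | hL
          · rw [pv_bScan_eq, List.length_eq_zero_iff.mp hL]
            rfl
          · have hpalms := hpos hL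
            have hlt : dist.keys.countP (fun z => pvCAt grid z.1 z.2 == 'P')
                < (palmCells grid).length := by
              omega
            obtain ⟨p, hp, hpk⟩ := pv_palmKeys_missing hlt
            have hnone : dist.get? p = none :=
              (PySem.Dict.get?_eq_none_iff_not_mem_keys _ _).mpr hpk
            rw [pv_bScan_eq, pv_scan_raise dist _ _ ⟨p, hp, hnone⟩]
        | cons y l₂' =>
          simp only [List.map_nil, List.nil_append]
          have hbc2 : bContinue grid (grid.length : Int) C d [] (y :: l₂') dist
              = bContinue grid (grid.length : Int) C (d + 1) (y :: l₂') [] dist := by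
            unfold bContinue
            rw [List.foldl_nil, bLoop]
            rw [if_neg (by simp), dif_pos h2]
          rw [hbc2]
          obtain ⟨yr, yc⟩ := y
          have := hpop (d + 1) yr yc l₂' [] dist palms
            (by simp only [List.length_cons, List.length_nil] at hm ⊢; omega) hn h2 (by simp)
            hnd hkc hpal hpos (fun z v hzv => le_trans (hval z v hzv) (by omega))
          simpa using this

lemma pv_bLoop_nil (grid : List String) (R C : Int) (dist : PySem.Dict (Int × Int) Int)
    (d : Int) : bLoop grid R C [] dist d = dist := by
  rw [bLoop]
  simp

-- ===== VERDICT (by name: the statement is the Claim_ definition above) =====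
theorem shortest_path_to_all_palms_spec : Claim_equal_shortest_path_to_all_palms := by
  unfold Claim_equal_shortest_path_to_all_palms
  intro grid _ hpre
  unfold Spec_shortest_path_to_all_palms
  obtain ⟨hne, hC, hrows, hpal0, -⟩ := hpre
  unfold shortest_path_to_all_palms shortest_path_to_all_palms_alt
  rw [pv_starts_eq]
  have hst := pv_starts_cells hC
  have hkeys0 : (PySem.Dict.empty : PySem.Dict (Int × Int) Int).keys = [] :=
    PySem.Dict.keys_empty
  have hmaster := pv_master grid (pvC grid) hrows
    (pvUnvis (grid.length : Int) (pvC grid)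
      (PySem.Dict.empty : PySem.Dict (Int × Int) Int).keys + 1)
    ((pvStarts grid (pvC grid)).length + 1) 0 (pvStarts grid (pvC grid)) []
    PySem.Dict.empty (count_palms grid)
    (by omega) (by simp) hst (by simp) (by rw [hkeys0]; exact List.nodup_nil)
    (by rw [hkeys0]; intro z hz; cases hz)
    (by rw [pv_CP, hkeys0]; simp)
    (by intro h; rw [pv_CP]; exact_mod_cast h)
    (by intro z v h; rw [PySem.Dict.get?_empty] at h; cases h)
  simp only [List.map_nil, List.append_nil] at hmaster
  have hveq : (PySem.Set.empty : PySem.Set (Int × Int))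
      = (PySem.Dict.empty : PySem.Dict (Int × Int) Int).keys := by
    rw [hkeys0]
    rfl
  rw [hveq, hmaster]
  have hbl : bContinue grid (grid.length : Int) (pvC grid) 0 (pvStarts grid (pvC grid)) []
        PySem.Dict.empty
      = bLoop grid (grid.length : Int) (pvC grid) (pvStarts grid (pvC grid))
          PySem.Dict.empty 0 := by
    cases hs : pvStarts grid (pvC grid) with
    | nil =>
      unfold bContinue
      rw [List.foldl_nil, pv_bLoop_nil, pv_bLoop_nil]
    | cons a l =>
      conv_rhs => rw [bLoop]
      rw [if_neg (by simp), dif_pos (hs ▸ hst)]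
      rfl
  rw [hbl]
  unfold pvBOut
  rcases hsc : bScan grid (bLoop grid (grid.length : Int) (pvC grid)
      (pvStarts grid (pvC grid)) PySem.Dict.empty 0) with _ | ob
  · rfl
  · rcases ob with _ | b <;> rfl
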